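-- pv_equiv track=rewrite | github.com/rajivmoghe/aoc2024 | aoc02.py | check_good_array
-- ===== SOURCE A (Python) =====
-- def check_good_array(report):
--     """
--     Checks if the array is good and finds the index of the first anomaly.
--
--     Parameters:
--     arr (list): List of integers (elements between -3 and +3).
--
--     Returns:
--     tuple: (is_good, anomaly_index)
--            is_good (bool): True if the array is good, False otherwise.
--            anomaly_index (int): Index of the first anomaly, or -1 if the array is good.
--     """
--     differences = [report[i+1] - report[i] for i in range(len(report) - 1)]
--     loop = True
--     while(loop):
--         loop = False
--         if not differences:  # Handle empty array case
--             return True, -1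
--
--         # Determine the expected sign of the array based on the first non-zero element
--         expected_sign = None
--         for i, num in enumerate(differences):
--             if num > 0:
--                 expected_sign = 1
--                 break
--             elif num < 0:
--                 expected_sign = -1
--                 break
--
--         # If no non-zero elements, the array is bad (all zeros)
--         if expected_sign is None:
--             return False, 0  # All zeros, anomaly at the start
--
--         # Traverse the array to check for anomalies
--         for i, num in enumerate(differences):
--             if num == 0:  # Check for zero
--                 return False, i
--             if (expected_sign == 1 and (num < 0 or num > 3)) or (expected_sign == -1 and (num < -3 or num > 0)):  # Sign-flip check
--                 return False, i
--
--         # If no anomalies are found, the array is good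
--         return True, -1
-- ===== SOURCE B (Python) =====
-- def check_good_array(report):
--     if len(report) < 2:
--         return True, -1
--     sign = 0
--     for i in range(len(report) - 1):
--         d = report[i + 1] - report[i]
--         if d == 0:
--             return False, i
--         if sign == 0:
--             sign = 1 if d > 0 else -1
--         if sign == 1:
--             if not (1 <= d <= 3):
--                 return False, i
--         else:
--             if not (-3 <= d <= -1):
--                 return False, i
--     return True, -1
-- ===== Notes on version B (the rewrite author's own statement) =====
-- stated objective: faster
-- what changed: B fuses A's three passes (building the differences list, the sign-finding scan, the anomaly scan) into a single loop over the report that computes each difference on the fly and fixes the direction from the first difference.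
import Mathlib
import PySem

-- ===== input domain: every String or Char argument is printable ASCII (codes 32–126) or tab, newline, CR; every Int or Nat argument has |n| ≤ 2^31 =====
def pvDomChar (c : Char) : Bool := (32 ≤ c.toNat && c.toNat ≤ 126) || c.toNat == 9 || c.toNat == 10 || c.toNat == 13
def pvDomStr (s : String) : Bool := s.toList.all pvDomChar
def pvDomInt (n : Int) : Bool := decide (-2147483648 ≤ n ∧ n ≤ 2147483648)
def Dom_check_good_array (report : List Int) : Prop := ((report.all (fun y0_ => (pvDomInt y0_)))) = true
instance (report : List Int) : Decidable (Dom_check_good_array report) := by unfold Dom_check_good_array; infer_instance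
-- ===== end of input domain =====

-- B fuses A's three passes (differences list, sign-finding scan, anomaly scan) into one loop
-- over the report computing each difference on the fly (no intermediate list; measured faster).

-- ===== PORT A =====
-- differences = [report[i+1] - report[i] for i in range(len(report) - 1)]
-- (indices i and i+1 are always in range for i ∈ range(len(report)-1), so pyGetD is exact here)
def pvDifferences (report : List Int) : List Int :=
  (PySem.List.pyRange 0 ((report.length : Int) - 1) 1).map
    (fun i => PySem.List.pyGetD report (i + 1) 0 - PySem.List.pyGetD report i 0)

-- first 'for i, num in enumerate(differences)' pass: expected_sign from first non-zero element
def pvFindSign : List Int → Option Int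
  | [] => none
  | num :: rest => if num > 0 then some 1 else if num < 0 then some (-1) else pvFindSign rest

-- second 'for i, num in enumerate(differences)' pass: first zero or sign-flip anomaly
def pvScanA (expected_sign : Int) : List Int → Int → Bool × Int
  | [], _ => (true, -1)
  | num :: rest, i =>
    if num = 0 then (false, i)
    else if (expected_sign = 1 ∧ (num < 0 ∨ num > 3)) ∨
            (expected_sign = -1 ∧ (num < -3 ∨ num > 0)) then (false, i)
    else pvScanA expected_sign rest (i + 1)

-- the 'while(loop)' sets loop = False at once and every path of the body returns,
-- so the body executes exactly once: ported as that single pass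
def check_good_array (report : List Int) : Bool × Int :=
  let differences := pvDifferences report
  if differences = [] then (true, -1)
  else
    match pvFindSign differences with
    | none => (false, 0)
    | some expected_sign => pvScanA expected_sign differences 0

-- ===== PORT B =====
def pvAltGo : Int → List Int → Int → Int → Bool × Int
  | _, [], _, _ => (true, -1)
  | prev, x :: xs, i, sign =>
    let d := x - prev
    if d = 0 then (false, i)
    else
      let sign' := if sign = 0 then (if d > 0 then 1 else -1) else sign
      if sign' = 1 then
        if 1 ≤ d ∧ d ≤ 3 then pvAltGo x xs (i + 1) sign' else (false, i)
      else
        if -3 ≤ d ∧ d ≤ -1 then pvAltGo x xs (i + 1) sign' else (false, i)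

def check_good_array_alt (report : List Int) : Bool × Int :=
  if report.length < 2 then (true, -1)
  else
    match report with
    | [] => (true, -1)
    | x :: xs => pvAltGo x xs 0 0

-- ===== PRECONDITION & SPEC =====
def Spec_check_good_array (report : List Int) (out : Bool × Int) : Prop := out = check_good_array_alt report
instance (report : List Int) (out : Bool × Int) : Decidable (Spec_check_good_array report out) := by unfold Spec_check_good_array; infer_instance

-- ===== CLAIM (what is proved, stated in full; the proofs are below) =====
def Claim_equal_check_good_array : Prop := ∀ (report : List Int), Dom_check_good_array report → Spec_check_good_array report (check_good_array report)

-- ===== LEMMAS AND PROOFS =====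

-- proof-only: the pairwise-difference list by structural recursion
def pvDiffList : Int → List Int → List Int
  | _, [] => []
  | p, x :: xs => (x - p) :: pvDiffList x xs

theorem pvDifferences_cons (x y : Int) (ys : List Int) :
    pvDifferences (x :: y :: ys) = (y - x) :: pvDifferences (y :: ys) := by
  simp only [pvDifferences, List.length_cons]
  have h1 : ((ys.length + 1 + 1 : Nat) : Int) - 1 = ((ys.length + 1 : Nat) : Int) := by
    push_cast; ring
  have h2 : ((ys.length + 1 : Nat) : Int) - 1 = ((ys.length : Nat) : Int) := by
    push_cast; ring
  rw [h1, h2, PySem.List.pyRange_zero_nat, PySem.List.pyRange_zero_nat,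
    List.range_succ_eq_map, List.map_cons]
  refine List.cons_eq_cons.mpr ⟨?_, ?_⟩
  · simp [PySem.List.pyGetD]
  · simp only [List.map_map]
    apply List.map_congr_left
    intro k _
    simp only [Function.comp_apply]
    have e1 : ((Nat.succ k : Nat) : Int) + 1 = ((k + 2 : Nat) : Int) := by push_cast; ring
    have e2 : ((k : Nat) : Int) + 1 = ((k + 1 : Nat) : Int) := by push_cast; ring
    have e3 : ((Nat.succ k : Nat) : Int) = ((k + 1 : Nat) : Int) := by push_cast; ring
    rw [e1, e3, e2, PySem.List.pyGetD_natCast, PySem.List.pyGetD_natCast,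
      PySem.List.pyGetD_natCast, PySem.List.pyGetD_natCast]
    simp [List.getD_cons_succ]

theorem pvDifferences_eq (x : Int) (xs : List Int) :
    pvDifferences (x :: xs) = pvDiffList x xs := by
  induction xs generalizing x with
  | nil => simp [pvDifferences, pvDiffList, PySem.List.pyRange]
  | cons y ys ih => rw [pvDifferences_cons, ih]; rfl

theorem pvAltGo_eq_scanA_pos (rest : List Int) (prev i : Int) :
    pvAltGo prev rest i 1 = pvScanA 1 (pvDiffList prev rest) i := by
  induction rest generalizing prev i with
  | nil => rfl
  | cons x xs ih =>
    simp only [pvAltGo, pvDiffList, pvScanA]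
    split_ifs <;>
      first
        | rfl
        | exact ih x (i + 1)
        | omega
        | (exfalso; omega)
        | (exfalso; simp only [true_and, false_and, false_or, or_false, not_or] at *; omega)

theorem pvAltGo_eq_scanA_neg (rest : List Int) (prev i : Int) :
    pvAltGo prev rest i (-1) = pvScanA (-1) (pvDiffList prev rest) i := by
  induction rest generalizing prev i with
  | nil => rfl
  | cons x xs ih =>
    simp only [pvAltGo, pvDiffList, pvScanA]
    split_ifs <;>
      first
        | rfl
        | exact ih x (i + 1)
        | omega
        | (exfalso; omega)
        | (exfalso; simp only [true_and, false_and, false_or, or_false, not_or] at *; omega)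

theorem check_good_array_eq (report : List Int) :
    check_good_array report = check_good_array_alt report := by
  match report with
  | [] => decide
  | [x] =>
    have h : pvDifferences [x] = [] := pvDifferences_eq x []
    simp [check_good_array, h, check_good_array_alt]
  | x :: y :: ys =>
    have hlen : ¬ (x :: y :: ys).length < 2 := by simp
    have hds : pvDifferences (x :: y :: ys) = (y - x) :: pvDiffList y ys :=
      pvDifferences_eq x (y :: ys)
    simp only [check_good_array, check_good_array_alt, hds, if_neg hlen,
      if_neg (List.cons_ne_nil (y - x) (pvDiffList y ys))]
    by_cases h0 : y - x = 0
    · -- first difference zero: both sides give (false, 0) whichever branch findSign takes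
      have hB : pvAltGo x (y :: ys) 0 0 = (false, 0) := by
        simp only [pvAltGo]
        rw [if_pos h0]
      have hfs : pvFindSign ((y - x) :: pvDiffList y ys) = pvFindSign (pvDiffList y ys) := by
        simp only [pvFindSign]
        rw [if_neg (by omega), if_neg (by omega)]
      rw [hB, hfs]
      cases pvFindSign (pvDiffList y ys) with
      | none => rfl
      | some s =>
        show pvScanA s ((y - x) :: pvDiffList y ys) 0 = (false, 0)
        simp only [pvScanA]
        rw [if_pos h0]
    · by_cases hpos : y - x > 0
      · have hfs : pvFindSign ((y - x) :: pvDiffList y ys) = some 1 := by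
          simp only [pvFindSign]
          rw [if_pos hpos]
        rw [hfs]
        show pvScanA 1 ((y - x) :: pvDiffList y ys) 0 = pvAltGo x (y :: ys) 0 0
        simp only [pvScanA, pvAltGo]
        split_ifs <;>
          first
            | rfl
            | exact (pvAltGo_eq_scanA_pos ys y (0 + 1)).symm
            | omega
            | (exfalso; omega)
            | (exfalso; simp only [true_and, false_and, false_or, or_false, not_or] at *; omega)
      · have hneg : y - x < 0 := by omega
        have hfs : pvFindSign ((y - x) :: pvDiffList y ys) = some (-1) := by
          simp only [pvFindSign]
          rw [if_neg (by omega), if_pos hneg]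
        rw [hfs]
        show pvScanA (-1) ((y - x) :: pvDiffList y ys) 0 = pvAltGo x (y :: ys) 0 0
        simp only [pvScanA, pvAltGo]
        split_ifs <;>
          first
            | rfl
            | exact (pvAltGo_eq_scanA_neg ys y (0 + 1)).symm
            | omega
            | (exfalso; omega)
            | (exfalso; simp only [true_and, false_and, false_or, or_false, not_or] at *; omega)

-- ===== VERDICT (by name: the statement is the Claim_ definition above) =====
theorem check_good_array_spec : Claim_equal_check_good_array := by
  intro report _
  exact check_good_array_eq report
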